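-- pv_equiv track=rewrite | github.com/Egraf99/Running_line | symbols.py | from_up_to_bottom_with_center
-- ===== SOURCE A (Python) =====
-- def from_up_to_bottom_with_center(pix_column: list, height: int, symbol_id, order_col) -> list:
--     for h in range(height):
--         if order_col > height // 2:
--             if h == order_col - 1:
--                 pix_column.append(symbol_id[0])
--             else:
--                 pix_column.append(0)
--         else:
--             if h == order_col - 1:
--                 pix_column.append(symbol_id[0])
--             elif h == height // 2:
--                 pix_column.append(symbol_id[1])
--             else:
--                 pix_column.append(0)
--     return pix_column
-- ===== SOURCE B (Python) =====
-- def from_up_to_bottom_with_center(pix_column: list, height: int, symbol_id, order_col) -> list: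
--     zeros = [0] * height
--     if 0 <= order_col - 1 < height:
--         zeros[order_col - 1] = symbol_id[0]
--     if order_col <= height // 2 < height:
--         zeros[height // 2] = symbol_id[1]
--     pix_column.extend(zeros)
--     return pix_column
-- ===== Notes on version B (the rewrite author's own statement) =====
-- stated objective: simpler
-- what changed: Replaces the per-row loop with its three-way branch by building a zero column once and doing at most two guarded index assignments (symbol at order_col-1, center symbol at height//2), then extending pix_column.
import Mathlib
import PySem

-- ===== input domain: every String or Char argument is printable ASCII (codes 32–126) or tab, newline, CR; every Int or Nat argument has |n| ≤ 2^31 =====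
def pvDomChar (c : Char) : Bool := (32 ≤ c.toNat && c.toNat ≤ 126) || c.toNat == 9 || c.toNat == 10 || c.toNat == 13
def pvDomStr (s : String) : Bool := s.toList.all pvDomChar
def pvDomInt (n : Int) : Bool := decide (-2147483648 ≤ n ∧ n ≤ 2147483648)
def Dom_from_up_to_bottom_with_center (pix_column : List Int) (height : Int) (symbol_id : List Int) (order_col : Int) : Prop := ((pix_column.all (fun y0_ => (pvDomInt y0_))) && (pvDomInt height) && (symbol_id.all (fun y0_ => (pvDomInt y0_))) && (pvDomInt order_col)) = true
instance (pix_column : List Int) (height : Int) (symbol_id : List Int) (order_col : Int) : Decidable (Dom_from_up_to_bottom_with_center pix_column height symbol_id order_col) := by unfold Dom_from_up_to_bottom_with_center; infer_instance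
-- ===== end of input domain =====

-- B builds the zero column once and places at most two symbols by index instead of branching per row (simpler decomposition, same cost).
-- Return-value equivalence; both Pythons mutate pix_column by appending/extending the same elements.


-- ===== PORT A =====
def from_up_to_bottom_with_center (pix_column : List Int) (height : Int) (symbol_id : List Int) (order_col : Int) : List Int :=
  (PySem.List.pyRange 0 height 1).foldl (fun acc h =>
    if order_col > PySem.Int.floordiv height 2 then
      if h = order_col - 1 then acc ++ [PySem.List.pyGetD symbol_id 0 0]
      else acc ++ [0]
    else
      if h = order_col - 1 then acc ++ [PySem.List.pyGetD symbol_id 0 0]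
      else if h = PySem.Int.floordiv height 2 then acc ++ [PySem.List.pyGetD symbol_id 1 0]
      else acc ++ [0]) pix_column

-- ===== PORT B =====
def from_up_to_bottom_with_center_alt (pix_column : List Int) (height : Int) (symbol_id : List Int) (order_col : Int) : List Int :=
  let zeros0 := PySem.List.pyRepeat [(0 : Int)] height
  let zeros1 := if 0 ≤ order_col - 1 ∧ order_col - 1 < height then
      PySem.List.pySetD zeros0 (order_col - 1) (PySem.List.pyGetD symbol_id 0 0)
    else zeros0
  let zeros2 := if order_col ≤ PySem.Int.floordiv height 2 ∧ PySem.Int.floordiv height 2 < height then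
      PySem.List.pySetD zeros1 (PySem.Int.floordiv height 2) (PySem.List.pyGetD symbol_id 1 0)
    else zeros1
  pix_column ++ zeros2

-- ===== PRECONDITION & SPEC =====
-- Pre_ excludes exactly the inputs on which A raises IndexError (symbol_id too short for an access that actually happens).
def Pre_from_up_to_bottom_with_center (pix_column : List Int) (height : Int) (symbol_id : List Int) (order_col : Int) : Prop :=
  ((1 ≤ order_col ∧ order_col ≤ height) → 1 ≤ symbol_id.length) ∧
  ((1 ≤ height ∧ order_col ≤ PySem.Int.floordiv height 2) → 2 ≤ symbol_id.length)
instance (pix_column : List Int) (height : Int) (symbol_id : List Int) (order_col : Int) : Decidable (Pre_from_up_to_bottom_with_center pix_column height symbol_id order_col) := by unfold Pre_from_up_to_bottom_with_center; infer_instance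
def pvWitness_from_up_to_bottom_with_center : List Int × Int × List Int × Int := ([5], 4, [7, 8], 1)

def Spec_from_up_to_bottom_with_center (pix_column : List Int) (height : Int) (symbol_id : List Int) (order_col : Int) (out : List Int) : Prop := out = from_up_to_bottom_with_center_alt pix_column height symbol_id order_col
instance (pix_column : List Int) (height : Int) (symbol_id : List Int) (order_col : Int) (out : List Int) : Decidable (Spec_from_up_to_bottom_with_center pix_column height symbol_id order_col out) := by unfold Spec_from_up_to_bottom_with_center; infer_instance

-- ===== CLAIM (what is proved, stated in full; the proofs are below) =====
def Claim_equal_from_up_to_bottom_with_center : Prop := ∀ (pix_column : List Int) (height : Int) (symbol_id : List Int) (order_col : Int), Dom_from_up_to_bottom_with_center pix_column height symbol_id order_col → Pre_from_up_to_bottom_with_center pix_column height symbol_id order_col → Spec_from_up_to_bottom_with_center pix_column height symbol_id order_col (from_up_to_bottom_with_center pix_column height symbol_id order_col)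

-- ===== LEMMAS AND PROOFS =====

-- A's per-row value as a function of the row index
def pvRow (height : Int) (symbol_id : List Int) (order_col : Int) (h : Int) : Int :=
  if order_col > PySem.Int.floordiv height 2 then
    if h = order_col - 1 then PySem.List.pyGetD symbol_id 0 0 else 0
  else
    if h = order_col - 1 then PySem.List.pyGetD symbol_id 0 0
    else if h = PySem.Int.floordiv height 2 then PySem.List.pyGetD symbol_id 1 0
    else 0

lemma pvMapEqZeros (height : Int) (symbol_id : List Int) (order_col : Int) :
    (PySem.List.pyRange 0 height 1).map (pvRow height symbol_id order_col) =
    (let zeros0 := PySem.List.pyRepeat [(0 : Int)] height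
     let zeros1 := if 0 ≤ order_col - 1 ∧ order_col - 1 < height then
         PySem.List.pySetD zeros0 (order_col - 1) (PySem.List.pyGetD symbol_id 0 0)
       else zeros0
     if order_col ≤ PySem.Int.floordiv height 2 ∧ PySem.Int.floordiv height 2 < height then
         PySem.List.pySetD zeros1 (PySem.Int.floordiv height 2) (PySem.List.pyGetD symbol_id 1 0)
       else zeros1) := by
  set m := PySem.Int.floordiv height 2 with hm
  have hmb : 2 * m ≤ height ∧ height < 2 * (m + 1) := by
    have := (PySem.Int.floordiv_eq_iff_of_pos (by omega : (0:Int) < 2) (a := height) (q := m)).mp hm.symm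
    omega
  have hlen : ∀ l : List Int, l.length = height.toNat →
      (∀ (k : Nat) (hk : k < l.length), l[k] = pvRow height symbol_id order_col (k : Int)) →
      (PySem.List.pyRange 0 height 1).map (pvRow height symbol_id order_col) = l := by
    intro l hl hval
    apply List.ext_getElem
    · simp [PySem.List.length_pyRange_one, hl]
    · intro k hk1 hk2
      rw [List.getElem_map, PySem.List.getElem_pyRange_one, zero_add, hval k hk2]
  simp only []
  by_cases c1 : 0 ≤ order_col - 1 ∧ order_col - 1 < height <;>
      by_cases c2 : order_col ≤ m ∧ m < height <;>
      [(rw [if_pos c1, if_pos c2, PySem.List.pySetD_of_nonneg _ _ (show (0:Int) ≤ m by omega),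
            PySem.List.pySetD_of_nonneg _ _ (show (0:Int) ≤ order_col - 1 by omega), PySem.List.pyRepeat_singleton]);
       (rw [if_pos c1, if_neg c2, PySem.List.pySetD_of_nonneg _ _ (show (0:Int) ≤ order_col - 1 by omega),
            PySem.List.pyRepeat_singleton]);
       (rw [if_neg c1, if_pos c2, PySem.List.pySetD_of_nonneg _ _ (show (0:Int) ≤ m by omega),
            PySem.List.pyRepeat_singleton]);
       (rw [if_neg c1, if_neg c2, PySem.List.pyRepeat_singleton])] <;>
      (apply hlen
       · simp
       · intro k hk
         have hk' : k < height.toNat := by simpa using hk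
         unfold pvRow
         simp only [List.getElem_set, List.getElem_replicate]
         split_ifs <;> first | rfl | omega)

-- ===== VERDICT (by name: the statement is the Claim_ definition above) =====
theorem from_up_to_bottom_with_center_spec : Claim_equal_from_up_to_bottom_with_center := by
  intro pix_column height symbol_id order_col _ _
  unfold Spec_from_up_to_bottom_with_center from_up_to_bottom_with_center from_up_to_bottom_with_center_alt
  have hfun : (fun (acc : List Int) (h : Int) =>
      if order_col > PySem.Int.floordiv height 2 then
        if h = order_col - 1 then acc ++ [PySem.List.pyGetD symbol_id 0 0]
        else acc ++ [0]
      else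
        if h = order_col - 1 then acc ++ [PySem.List.pyGetD symbol_id 0 0]
        else if h = PySem.Int.floordiv height 2 then acc ++ [PySem.List.pyGetD symbol_id 1 0]
        else acc ++ [0]) = fun acc h => acc ++ [pvRow height symbol_id order_col h] := by
    funext acc h
    unfold pvRow
    split_ifs <;> rfl
  rw [hfun, PySem.List.foldl_append_singleton_eq_map, pvMapEqZeros]
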